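-- pv_equiv track=rewrite | github.com/zzzaaa12/whisper_webapp | src/services/transcription_schedule_service.py | _ranges_to_slots
-- ===== SOURCE A (Python) =====
-- from typing import Dict, List, Optional
--
-- SLOTS_PER_DAY = 48
--
-- SLOT_MINUTES = 30
--
-- def _parse_time_to_slot(value: str) -> int:
--     hour_text, minute_text = value.split(":", 1)
--     hour = int(hour_text)
--     minute = int(minute_text)
--     return (hour * 60 + minute) // SLOT_MINUTES
--
-- def _ranges_to_slots(ranges: List[str]) -> List[bool]:
--     slots = [False] * SLOTS_PER_DAY
--     for range_value in ranges:
--         if not isinstance(range_value, str) or "-" not in range_value: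
--             continue
--         start_text, end_text = range_value.split("-", 1)
--         try:
--             start_slot = max(0, min(SLOTS_PER_DAY, _parse_time_to_slot(start_text)))
--             end_slot = max(0, min(SLOTS_PER_DAY, _parse_time_to_slot(end_text)))
--         except Exception:
--             continue
--
--         for slot in range(start_slot, end_slot):
--             slots[slot] = True
--     return slots
-- ===== SOURCE B (Python) =====
-- from typing import List
--
-- SLOTS_PER_DAY = 48
--
-- SLOT_MINUTES = 30
--
-- def _parse_time_to_slot(value: str) -> int:
--     hour_text, minute_text = value.split(":", 1)
--     hour = int(hour_text)
--     minute = int(minute_text)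
--     return (hour * 60 + minute) // SLOT_MINUTES
--
-- def _ranges_to_slots(ranges: List[str]) -> List[bool]:
--     delta = [0] * (SLOTS_PER_DAY + 1)
--     for range_value in ranges:
--         if not isinstance(range_value, str) or "-" not in range_value:
--             continue
--         start_text, end_text = range_value.split("-", 1)
--         try:
--             start_slot = max(0, min(SLOTS_PER_DAY, _parse_time_to_slot(start_text)))
--             end_slot = max(0, min(SLOTS_PER_DAY, _parse_time_to_slot(end_text)))
--         except Exception:
--             continue
--         if start_slot < end_slot:
--             delta[start_slot] += 1
--             delta[end_slot] -= 1
--     slots = []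
--     running = 0
--     for i in range(SLOTS_PER_DAY):
--         running += delta[i]
--         slots.append(running > 0)
--     return slots
-- ===== Notes on version B (the rewrite author's own statement) =====
-- stated objective: alternative
-- what changed: B replaces A's inner per-slot filling loop with a difference array (delta[start]+=1, delta[end]-=1 for non-empty clamped ranges) followed by one running-sum sweep that marks a slot covered iff the running count is positive.
import Mathlib
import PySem

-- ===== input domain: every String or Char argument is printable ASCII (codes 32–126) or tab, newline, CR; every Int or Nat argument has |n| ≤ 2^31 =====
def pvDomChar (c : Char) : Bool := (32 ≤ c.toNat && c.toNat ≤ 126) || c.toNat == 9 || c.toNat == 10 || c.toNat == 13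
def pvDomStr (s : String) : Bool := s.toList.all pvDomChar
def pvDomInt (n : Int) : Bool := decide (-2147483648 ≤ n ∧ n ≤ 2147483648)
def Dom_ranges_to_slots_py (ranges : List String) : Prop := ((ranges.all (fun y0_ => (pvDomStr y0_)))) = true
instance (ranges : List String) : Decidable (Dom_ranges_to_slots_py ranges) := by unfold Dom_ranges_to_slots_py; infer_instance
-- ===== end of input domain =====

-- B replaces A's inner slot-filling loop by a difference array (delta[start]+=1, delta[end]-=1
-- for non-empty clamped ranges) swept once with a running sum; same validation and parsing.

-- helper shared by both Pythons (_parse_time_to_slot as called under the try/except):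
-- none exactly where the Python call raises (no ':' → unpack ValueError, int() ValueError)
def parseTimeToSlot? (value : String) : Option Int :=
  match PySem.Str.splitMax? value ":" 1 with
  | some [hour_text, minute_text] =>
    match PySem.Int.ofStr? hour_text, PySem.Int.ofStr? minute_text with
    | some hour, some minute => some (PySem.Int.floordiv (hour * 60 + minute) 30)
    | _, _ => none
  | _ => none

-- ===== PORT A =====
def ranges_to_slots_py (ranges : List String) : List Bool :=
  ranges.foldl (fun slots range_value =>
    if PySem.Str.isIn "-" range_value then
      match PySem.Str.splitMax? range_value "-" 1 with
      | some (start_text :: end_text :: _) =>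
        match parseTimeToSlot? start_text, parseTimeToSlot? end_text with
        | some ps, some pe =>
          let start_slot := max 0 (min 48 ps)
          let end_slot := max 0 (min 48 pe)
          (PySem.List.pyRange start_slot end_slot 1).foldl
            (fun sl slot => PySem.List.pySetD sl slot true) slots
        | _, _ => slots
      | _ => slots
    else slots) (List.replicate 48 false)

-- ===== PORT B =====
def ranges_to_slots_py_alt (ranges : List String) : List Bool :=
  let delta : List Int := ranges.foldl (fun d range_value =>
    if PySem.Str.isIn "-" range_value then
      match PySem.Str.splitMax? range_value "-" 1 with
      | some (start_text :: end_text :: _) =>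
        match parseTimeToSlot? start_text, parseTimeToSlot? end_text with
        | some ps, some pe =>
          let start_slot := max 0 (min 48 ps)
          let end_slot := max 0 (min 48 pe)
          if start_slot < end_slot then
            let d1 := PySem.List.pySetD d start_slot (PySem.List.pyGetD d start_slot 0 + 1)
            PySem.List.pySetD d1 end_slot (PySem.List.pyGetD d1 end_slot 0 - 1)
          else d
        | _, _ => d
      | _ => d
    else d) (List.replicate 49 0)
  ((PySem.List.pyRange 0 48 1).foldl (fun (p : Int × List Bool) i =>
      let running := p.1 + PySem.List.pyGetD delta i 0
      (running, p.2 ++ [decide (running > 0)])) ((0 : Int), ([] : List Bool))).2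

-- ===== PRECONDITION & SPEC =====
def Spec_ranges_to_slots_py (ranges : List String) (out : List Bool) : Prop := out = ranges_to_slots_py_alt ranges
instance (ranges : List String) (out : List Bool) : Decidable (Spec_ranges_to_slots_py ranges out) := by unfold Spec_ranges_to_slots_py; infer_instance

-- ===== CLAIM (what is proved, stated in full; the proofs are below) =====
def Claim_equal_ranges_to_slots_py : Prop := ∀ (ranges : List String), Dom_ranges_to_slots_py ranges → Spec_ranges_to_slots_py ranges (ranges_to_slots_py ranges)

-- ===== LEMMAS AND PROOFS =====

-- the clamped interval a valid range string contributes (mirrors the shared validation)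
def rangeIv? (r : String) : Option (Int × Int) :=
  if PySem.Str.isIn "-" r then
    match PySem.Str.splitMax? r "-" 1 with
    | some (start_text :: end_text :: _) =>
      match parseTimeToSlot? start_text, parseTimeToSlot? end_text with
      | some ps, some pe => some (max 0 (min 48 ps), max 0 (min 48 pe))
      | _, _ => none
    | _ => none
  else none

def ivs (rs : List String) : List (Int × Int) := rs.filterMap rangeIv?
def ivsB (rs : List String) : List (Int × Int) := (ivs rs).filter (fun p => decide (p.1 < p.2))

def fill (s e : Int) (slots : List Bool) : List Bool :=
  (PySem.List.pyRange s e 1).foldl (fun sl slot => PySem.List.pySetD sl slot true) slots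

def coversB (p : Int × Int) (i : Int) : Bool := decide (p.1 ≤ i ∧ i < p.2)

lemma rangeIv?_bounds {r : String} {s e : Int} (h : rangeIv? r = some (s, e)) :
    0 ≤ s ∧ s ≤ 48 ∧ 0 ≤ e ∧ e ≤ 48 := by
  unfold rangeIv? at h
  by_cases hin : PySem.Str.isIn "-" r = true
  · rw [if_pos hin] at h
    rcases hsp : PySem.Str.splitMax? r "-" 1 with _ | ⟨_ | ⟨a, _ | ⟨b, rest⟩⟩⟩ <;> rw [hsp] at h
    · simp at h
    · simp at h
    · simp at h
    · dsimp only at h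
      rcases h1 : parseTimeToSlot? a with _ | ps <;> rw [h1] at h
      · simp at h
      · rcases h2 : parseTimeToSlot? b with _ | pe <;> rw [h2] at h
        · simp at h
        · simp only [Option.some.injEq, Prod.mk.injEq] at h
          obtain ⟨hs, he⟩ := h
          subst hs; subst he
          omega
  · rw [if_neg hin] at h; simp at h

lemma fill_getElem? (s e : Int) (hs : 0 ≤ s) (slots : List Bool) (i : Nat) :
    (fill s e slots)[i]? = slots[i]?.map (fun b => b || coversB (s, e) i) := by
  suffices h : ∀ (n : Nat) (s : Int), 0 ≤ s → (e - s).toNat = n → ∀ slots : List Bool,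
      (fill s e slots)[i]? = slots[i]?.map (fun b => b || coversB (s, e) i) from
    h _ s hs rfl slots
  intro n
  induction n with
  | zero =>
    intro s hs0 hn slots
    have hle : e ≤ s := by omega
    rw [fill, PySem.List.pyRange_one_eq_nil hle, List.foldl_nil]
    have hcv : coversB (s, e) i = false := by simp only [coversB, decide_eq_false_iff_not]; omega
    rw [hcv]; cases slots[i]? <;> simp
  | succ n ih =>
    intro s hs0 hn slots
    have hlt : s < e := by omega
    rw [fill, PySem.List.pyRange_one_cons hlt, List.foldl_cons]
    have hih := ih (s + 1) (by omega) (by omega) (PySem.List.pySetD slots s true)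
    rw [fill] at hih
    rw [hih, PySem.List.pySetD_of_nonneg slots true hs0, List.getElem?_set]
    by_cases hsi : s.toNat = i
    · have hsi' : s = (i : Int) := by omega
      have hc1 : coversB (s + 1, e) (i : Int) = false := by
        simp only [coversB, decide_eq_false_iff_not]; omega
      have hc2 : coversB (s, e) (i : Int) = true := by
        simp only [coversB, decide_eq_true_eq]; omega
      rw [if_pos hsi, hc1, hc2, hsi]
      rcases Nat.lt_or_ge i slots.length with hl | hl
      · rw [if_pos hl, List.getElem?_eq_getElem hl]; simp
      · rw [if_neg (by omega), List.getElem?_eq_none (by omega)]; simp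
    · have : coversB (s + 1, e) (i : Int) = coversB (s, e) (i : Int) := by
        simp only [coversB, decide_eq_decide]; omega
      rw [if_neg hsi, this]

lemma A_fold (rs : List String) (slots : List Bool) (i : Nat) :
    (rs.foldl (fun slots range_value =>
      if PySem.Str.isIn "-" range_value then
        match PySem.Str.splitMax? range_value "-" 1 with
        | some (start_text :: end_text :: _) =>
          match parseTimeToSlot? start_text, parseTimeToSlot? end_text with
          | some ps, some pe =>
            let start_slot := max 0 (min 48 ps)
            let end_slot := max 0 (min 48 pe)
            (PySem.List.pyRange start_slot end_slot 1).foldl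
              (fun sl slot => PySem.List.pySetD sl slot true) slots
          | _, _ => slots
        | _ => slots
      else slots) slots)[i]? =
    slots[i]?.map (fun b => b || (ivs rs).any (fun p => coversB p i)) := by
  induction rs generalizing slots with
  | nil => simp only [List.foldl_nil, ivs, List.filterMap_nil, List.any_nil]
           cases slots[i]? <;> simp
  | cons r t ih =>
    rw [List.foldl_cons]
    have hiv : ivs (r :: t) =
        (match rangeIv? r with | some p => [p] | none => []) ++ ivs t := by
      simp only [ivs, List.filterMap_cons]; cases rangeIv? r <;> simp
    cases hin : PySem.Str.isIn "-" r with
    | false =>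
      have hr : rangeIv? r = none := by unfold rangeIv?; rw [hin]; simp
      rw [hiv, hr]
      simp only [List.nil_append]
      rw [ih]
      simp only [hin, Bool.false_eq_true, if_false]
    | true =>
      rcases hsp : PySem.Str.splitMax? r "-" 1 with _ | ⟨_ | ⟨a, _ | ⟨b, rest⟩⟩⟩ <;>
        simp only [hin, if_true, hsp] <;>
        [rw [hiv]; rw [hiv]; rw [hiv]; skip] <;>
        [(have hr : rangeIv? r = none := by unfold rangeIv?; rw [if_pos hin, hsp]);
         (have hr : rangeIv? r = none := by unfold rangeIv?; rw [if_pos hin, hsp]);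
         (have hr : rangeIv? r = none := by unfold rangeIv?; rw [if_pos hin, hsp]);
         skip] <;> [rw [hr]; rw [hr]; rw [hr]; skip] <;> [simpa using ih slots;
          simpa using ih slots; simpa using ih slots; skip]
      rcases h1 : parseTimeToSlot? a with _ | ps <;>
        rcases h2 : parseTimeToSlot? b with _ | pe <;> simp only [h1, h2]
      · have hr : rangeIv? r = none := by unfold rangeIv?; rw [if_pos hin, hsp]; dsimp only; rw [h1]
        rw [hiv, hr]; simpa using ih slots
      · have hr : rangeIv? r = none := by unfold rangeIv?; rw [if_pos hin, hsp]; dsimp only; rw [h1, h2]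
        rw [hiv, hr]; simpa using ih slots
      · have hr : rangeIv? r = none := by unfold rangeIv?; rw [if_pos hin, hsp]; dsimp only; rw [h1, h2]
        rw [hiv, hr]; simpa using ih slots
      · have hr : rangeIv? r = some (max 0 (min 48 ps), max 0 (min 48 pe)) := by
          unfold rangeIv?; rw [if_pos hin, hsp]; dsimp only; rw [h1, h2]
        rw [ih, hiv, hr]
        have hfg := fill_getElem? (max 0 (min 48 ps)) (max 0 (min 48 pe))
          (le_max_left 0 _) slots i
        rw [fill] at hfg
        rw [hfg]
        cases slots[i]? <;> simp [Bool.or_assoc]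

-- running prefix sums of the delta list
def psum (d : List Int) (n : Nat) : Int := ((List.range n).map (fun k => d.getD k 0)).sum

lemma psum_succ (d : List Int) (n : Nat) : psum d (n + 1) = psum d n + d.getD n 0 := by
  simp [psum, List.range_succ]

lemma getD_set_eq (d : List Int) (m : Nat) (a : Int) (k : Nat) :
    (d.set m a).getD k 0 = if m = k ∧ m < d.length then a else d.getD k 0 := by
  by_cases h1 : m = k
  · subst h1
    by_cases h2 : m < d.length
    · simp [List.getD_eq_getElem?_getD, List.getElem?_set, h2]
    · have hk : d.length ≤ m := by omega
      simp [List.getD_eq_getElem?_getD, List.getElem?_set, h2, List.getElem?_eq_none hk]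
  · simp [List.getD_eq_getElem?_getD, List.getElem?_set, h1]

lemma psum_set (d : List Int) (m : Nat) (c : Int) (hm : m < d.length) (n : Nat) :
    psum (d.set m (d.getD m 0 + c)) n = psum d n + if m < n then c else 0 := by
  induction n with
  | zero => simp [psum]
  | succ n ih =>
    rw [psum_succ, psum_succ, ih, getD_set_eq]
    by_cases h1 : m = n <;> by_cases h2 : m < n <;> simp [h1, h2, hm] <;> omega

lemma B_fold_psum (rs : List String) (d : List Int) (hd : d.length = 49) (n : Nat) :
    psum (rs.foldl (fun d range_value =>
      if PySem.Str.isIn "-" range_value then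
        match PySem.Str.splitMax? range_value "-" 1 with
        | some (start_text :: end_text :: _) =>
          match parseTimeToSlot? start_text, parseTimeToSlot? end_text with
          | some ps, some pe =>
            let start_slot := max 0 (min 48 ps)
            let end_slot := max 0 (min 48 pe)
            if start_slot < end_slot then
              let d1 := PySem.List.pySetD d start_slot (PySem.List.pyGetD d start_slot 0 + 1)
              PySem.List.pySetD d1 end_slot (PySem.List.pyGetD d1 end_slot 0 - 1)
            else d
          | _, _ => d
        | _ => d
      else d) d) n =
    psum d n + ((ivsB rs).countP (fun p => decide (p.1 < (n : Int))) : Int)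
             - ((ivsB rs).countP (fun p => decide (p.2 < (n : Int))) : Int) := by
  induction rs generalizing d with
  | nil => simp [ivsB, ivs]
  | cons r t ih =>
    rw [List.foldl_cons]
    have hivB : ∀ h : rangeIv? r = none, ivsB (r :: t) = ivsB t := by
      intro h; simp [ivsB, ivs, List.filterMap_cons, h]
    cases hin : PySem.Str.isIn "-" r with
    | false =>
      have hr : rangeIv? r = none := by unfold rangeIv?; rw [hin]; simp
      rw [hivB hr]
      have := ih d hd
      simpa only [hin, Bool.false_eq_true, if_false] using this
    | true =>
      rcases hsp : PySem.Str.splitMax? r "-" 1 with _ | ⟨_ | ⟨a, _ | ⟨b, rest⟩⟩⟩ <;>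
        simp only [hin, if_true, hsp] <;>
        [(rw [hivB (by unfold rangeIv?; rw [if_pos hin, hsp])]; exact ih d hd);
         (rw [hivB (by unfold rangeIv?; rw [if_pos hin, hsp])]; exact ih d hd);
         (rw [hivB (by unfold rangeIv?; rw [if_pos hin, hsp])]; exact ih d hd);
         skip]
      rcases h1 : parseTimeToSlot? a with _ | ps <;>
        rcases h2 : parseTimeToSlot? b with _ | pe <;> simp only [h1, h2]
      · rw [hivB (by unfold rangeIv?; rw [if_pos hin, hsp]; dsimp only; rw [h1])]
        exact ih d hd
      · rw [hivB (by unfold rangeIv?; rw [if_pos hin, hsp]; dsimp only; rw [h1, h2])]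
        exact ih d hd
      · rw [hivB (by unfold rangeIv?; rw [if_pos hin, hsp]; dsimp only; rw [h1, h2])]
        exact ih d hd
      · have hr : rangeIv? r = some (max 0 (min 48 ps), max 0 (min 48 pe)) := by
          unfold rangeIv?; rw [if_pos hin, hsp]; dsimp only; rw [h1, h2]
        obtain ⟨hs0, hs48, he0, he48⟩ := rangeIv?_bounds hr
        set s := max 0 (min 48 ps) with hsdef
        set e := max 0 (min 48 pe) with hedef
        have hiv : ivsB (r :: t) =
            (if s < e then [(s, e)] else []) ++ ivsB t := by
          simp only [ivsB, ivs, List.filterMap_cons, hr, List.filter_cons]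
          by_cases h : s < e <;> simp [h]
        rw [hiv]
        by_cases hse : s < e
        · rw [if_pos hse]
          have hds : d.length = 49 := hd
          have hd1 : (PySem.List.pySetD d s (PySem.List.pyGetD d s 0 + 1)).length = 49 := by
            rw [PySem.List.length_pySetD, hds]
          rw [ih _ (by rw [PySem.List.length_pySetD, hd1])]
          rw [PySem.List.pyGetD_of_nonneg d 0 hs0, PySem.List.pySetD_of_nonneg d _ hs0]
          set d1 := d.set s.toNat (d.getD s.toNat 0 + 1) with hd1def
          rw [PySem.List.pyGetD_of_nonneg d1 0 he0, PySem.List.pySetD_of_nonneg d1 _ he0]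
          rw [show d1.getD e.toNat 0 - 1 = d1.getD e.toNat 0 + (-1) by ring]
          rw [psum_set d1 e.toNat (-1) (by rw [hd1def]; simp [hds]; omega)]
          rw [hd1def, psum_set d s.toNat 1 (by omega)]
          simp only [hse, if_true, List.singleton_append, List.countP_cons, decide_eq_true_eq]
          push_cast
          split_ifs <;> omega
        · rw [if_neg hse, ih d hd]
          simp [hse]

lemma psum_replicate_zero (n k : Nat) : psum (List.replicate k (0 : Int)) n = 0 := by
  induction n with
  | zero => simp [psum]
  | succ n ih => rw [psum_succ, ih]; rcases Nat.lt_or_ge n k with h | h <;> simp [List.getD, h]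

lemma count_diff (L : List (Int × Int)) (hL : ∀ p ∈ L, p.1 < p.2) (i : Int) :
    (L.countP (fun p => decide (p.1 ≤ i)) : Int) - (L.countP (fun p => decide (p.2 ≤ i)) : Int) =
    (L.countP (fun p => coversB p i) : Int) := by
  induction L with
  | nil => simp
  | cons p t ih =>
    have hp := hL p (List.mem_cons_self ..)
    have ht := ih (fun q hq => hL q (List.mem_cons_of_mem _ hq))
    simp only [List.countP_cons, coversB] at *
    by_cases h1 : p.1 ≤ i <;> by_cases h2 : p.2 ≤ i <;> by_cases h3 : i < p.2 <;>
      simp only [h1, h2, h3, decide_true, decide_false, and_true, and_false] <;> push_cast <;> omega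
lemma any_ivs_eq_any_ivsB (rs : List String) (i : Int) :
    (ivs rs).any (fun p => coversB p i) = (ivsB rs).any (fun p => coversB p i) := by
  unfold ivsB
  induction ivs rs with
  | nil => simp
  | cons p t ih =>
    by_cases h : p.1 < p.2
    · simp [h, ih]
    · have : coversB p i = false := by simp [coversB]; omega
      simp [h, this, ih]

lemma sweep_spec (delta : List Int) (m : Nat) :
    ((PySem.List.pyRange 0 (m : Int) 1).foldl (fun (p : Int × List Bool) i =>
      let running := p.1 + PySem.List.pyGetD delta i 0
      (running, p.2 ++ [decide (running > 0)])) ((0 : Int), ([] : List Bool))) =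
    (psum delta m, (List.range m).map (fun i => decide (0 < psum delta (i + 1)))) := by
  induction m with
  | zero =>
    rw [PySem.List.pyRange_one_eq_nil (by norm_num), List.foldl_nil]
    simp [psum]
  | succ m ih =>
    have hcast : ((m + 1 : Nat) : Int) = (m : Int) + 1 := by push_cast; ring
    rw [hcast, PySem.List.pyRange_one_succ_right (by positivity), List.foldl_append, ih,
      List.foldl_cons, List.foldl_nil]
    dsimp only
    rw [PySem.List.pyGetD_of_nonneg delta 0 (by positivity), Int.toNat_natCast,
      ← psum_succ, List.range_succ, List.map_append]
    rfl


-- the delta list B builds (proof-side name for B's first fold)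
def deltaOf (rs : List String) : List Int :=
  rs.foldl (fun d range_value =>
    if PySem.Str.isIn "-" range_value then
      match PySem.Str.splitMax? range_value "-" 1 with
      | some (start_text :: end_text :: _) =>
        match parseTimeToSlot? start_text, parseTimeToSlot? end_text with
        | some ps, some pe =>
          let start_slot := max 0 (min 48 ps)
          let end_slot := max 0 (min 48 pe)
          if start_slot < end_slot then
            let d1 := PySem.List.pySetD d start_slot (PySem.List.pyGetD d start_slot 0 + 1)
            PySem.List.pySetD d1 end_slot (PySem.List.pyGetD d1 end_slot 0 - 1)
          else d
        | _, _ => d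
      | _ => d
    else d) (List.replicate 49 0)

lemma alt_eq (rs : List String) : ranges_to_slots_py_alt rs =
    (List.range 48).map (fun i => decide (0 < psum (deltaOf rs) (i + 1))) := by
  unfold ranges_to_slots_py_alt
  dsimp only
  rw [show (48 : Int) = ((48 : Nat) : Int) by norm_num, sweep_spec]
  rfl

lemma deltaOf_psum (rs : List String) (n : Nat) :
    psum (deltaOf rs) n = ((ivsB rs).countP (fun p => decide (p.1 < (n : Int))) : Int)
      - ((ivsB rs).countP (fun p => decide (p.2 < (n : Int))) : Int) := by
  unfold deltaOf
  rw [B_fold_psum rs _ (by simp), psum_replicate_zero]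
  ring

-- ===== VERDICT (by name: the statement is the Claim_ definition above) =====
theorem ranges_to_slots_py_spec : Claim_equal_ranges_to_slots_py := by
  unfold Claim_equal_ranges_to_slots_py
  intro ranges _
  unfold Spec_ranges_to_slots_py
  apply List.ext_getElem?
  intro i
  rw [alt_eq]
  unfold ranges_to_slots_py
  rw [A_fold, List.getElem?_map, List.getElem?_replicate]
  by_cases hi : i < 48
  · rw [if_pos hi, List.getElem?_range hi]
    simp only [Option.map_some, Bool.false_or, Option.some.injEq]
    rw [any_ivs_eq_any_ivsB, deltaOf_psum]
    have hmem : ∀ p ∈ ivsB ranges, p.1 < p.2 := by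
      intro p hp
      have := List.of_mem_filter hp
      simpa using this
    have h1 : (fun p : Int × Int => decide (p.1 < ((i + 1 : Nat) : Int))) =
        (fun p : Int × Int => decide (p.1 ≤ (i : Int))) := by
      funext p; rw [decide_eq_decide]; push_cast; omega
    have h2 : (fun p : Int × Int => decide (p.2 < ((i + 1 : Nat) : Int))) =
        (fun p : Int × Int => decide (p.2 ≤ (i : Int))) := by
      funext p; rw [decide_eq_decide]; push_cast; omega
    rw [h1, h2, count_diff (ivsB ranges) hmem]
    rw [Bool.eq_iff_iff]
    simp only [List.any_eq_true, decide_eq_true_eq, Int.natCast_pos, List.countP_pos_iff,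
      coversB]
  · rw [if_neg hi, List.getElem?_eq_none (by simpa using hi)]
    simp
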